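-- pv_equiv track=rewrite | github.com/Gianni-G/semiolog | semiolog/syntagmatic/tokenizer/__init__.py | build_graph_data
-- ===== SOURCE A (Python) =====
-- from typing import List
--
-- def build_graph_data(
--
--     string: str,
--     voc: dict
--     )-> List[tuple]:
--
--     edge_data = []
--     for beginning in range(0, len(string)):
--         for end in range(beginning + 1, len(string) + 1):
--             subsequence_label = string[beginning:end]
--             if subsequence_label not in voc or subsequence_label == string:
--                 continue
--             edge_data.append(
--                 (
--                     beginning,
--                     end,
--                     {
--                         "label": subsequence_label,
--                     },
--                 )
--             )
--
--     return edge_data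
-- ===== SOURCE B (Python) =====
-- def build_graph_data(string, voc):
--     # Prefix-set pruning: precompute every non-empty prefix of every vocabulary
--     # key, then per start position extend the substring one char at a time and
--     # break as soon as it is no prefix of any key (no longer substring can match).
--     n = len(string)
--     prefixes = set()
--     for w in voc:
--         for i in range(1, len(w) + 1):
--             prefixes.add(w[:i])
--     edges = []
--     for b in range(n):
--         lab = ""
--         for e in range(b + 1, n + 1):
--             lab += string[e - 1]
--             if lab not in prefixes:
--                 break
--             if lab in voc and lab != string:
--                 edges.append((b, e, {"label": lab}))
--     return edges
-- ===== Notes on version B (the rewrite author's own statement) =====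
-- stated objective: faster
-- what changed: Instead of testing every one of the O(n^2) substrings against the vocabulary, B precomputes the set of all non-empty prefixes of vocabulary keys and, per start position, grows the substring one character at a time, breaking out as soon as it is not a prefix of any key.
import Mathlib
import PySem

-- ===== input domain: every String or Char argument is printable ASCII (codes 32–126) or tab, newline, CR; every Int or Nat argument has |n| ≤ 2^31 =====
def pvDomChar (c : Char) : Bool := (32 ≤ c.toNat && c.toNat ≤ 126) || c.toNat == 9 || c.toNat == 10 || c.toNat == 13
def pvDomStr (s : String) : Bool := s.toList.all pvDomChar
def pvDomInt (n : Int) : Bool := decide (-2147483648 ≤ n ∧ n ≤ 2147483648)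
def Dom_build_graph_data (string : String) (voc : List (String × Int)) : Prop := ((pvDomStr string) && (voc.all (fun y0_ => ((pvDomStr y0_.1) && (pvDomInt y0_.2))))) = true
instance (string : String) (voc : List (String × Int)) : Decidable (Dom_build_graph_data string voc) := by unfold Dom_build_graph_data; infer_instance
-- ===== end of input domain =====

-- B changes the algorithm: a precomputed set of all non-empty vocabulary-key prefixes lets the
-- inner loop grow the substring one character at a time and break early; A checks every substring.

-- ===== PORT A =====
def build_graph_data (string : String) (voc : List (String × Int)) : List (Int × Int × (List (String × String))) :=
  (PySem.List.pyRange 0 (PySem.Str.len string) 1).foldl (fun edge_data beginning =>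
    (PySem.List.pyRange (beginning + 1) (PySem.Str.len string + 1) 1).foldl (fun ed e =>
      let sub := PySem.Str.slice string (some beginning) (some e)
      if (!(voc.any (fun kv => kv.1 == sub))) || (sub == string) then ed
      else ed ++ [(beginning, e, [("label", sub)])]) edge_data) []

-- ===== PORT B =====
-- the set of all non-empty prefixes w[:i] of vocabulary keys (Source B's `prefixes`)
def bgdPrefixes (voc : List (String × Int)) : PySem.Set (List Char) :=
  voc.foldl (fun pfs w =>
    (PySem.List.pyRange 1 (PySem.Str.len w.1 + 1) 1).foldl (fun pfs2 i =>
      PySem.Set.add pfs2 (PySem.Chars.slice w.1.toList none (some i))) pfs) PySem.Set.empty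

-- Source B's inner `for e in range(b+1, n+1)` loop with its `break` (string handled on the .toList side;
-- the pyGet? `.elim` default is never taken: e-1 is always in range)
def bgdInner (s : List Char) (voc : List (String × Int)) (pfs : PySem.Set (List Char)) (b : Int) :
    List Int → List Char → List (Int × Int × (List (String × String))) → List (Int × Int × (List (String × String)))
  | [], _, edges => edges
  | e :: rest, lab0, edges =>
    let lab : List Char := lab0 ++ (PySem.List.pyGet? s (e - 1)).elim [] (fun c => [c])
    if !(PySem.Set.contains pfs lab) then edges
    else
      bgdInner s voc pfs b rest lab
        (if (voc.any (fun kv => kv.1.toList == lab)) && !(lab == s) then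
          edges ++ [(b, e, [("label", String.ofList lab)])]
        else edges)

def build_graph_data_alt (string : String) (voc : List (String × Int)) : List (Int × Int × (List (String × String))) :=
  let pfs := bgdPrefixes voc
  (PySem.List.pyRange 0 (PySem.Str.len string) 1).foldl (fun edges b =>
    bgdInner string.toList voc pfs b (PySem.List.pyRange (b + 1) (PySem.Str.len string + 1) 1) [] edges) []

-- ===== PRECONDITION & SPEC =====
def Spec_build_graph_data (string : String) (voc : List (String × Int)) (out : List (Int × Int × (List (String × String)))) : Prop := out = build_graph_data_alt string voc
instance (string : String) (voc : List (String × Int)) (out : List (Int × Int × (List (String × String)))) : Decidable (Spec_build_graph_data string voc out) := by unfold Spec_build_graph_data; infer_instance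

-- ===== CLAIM (what is proved, stated in full; the proofs are below) =====
def Claim_equal_build_graph_data : Prop := ∀ (string : String) (voc : List (String × Int)), Dom_build_graph_data string voc → Spec_build_graph_data string voc (build_graph_data string voc)

-- ===== LEMMAS AND PROOFS =====

-- A's inner-loop body, extracted (definitionally equal to A's lambda)
def aInner (string : String) (voc : List (String × Int)) (beginning : Int)
    (ed : List (Int × Int × (List (String × String)))) (e : Int) : List (Int × Int × (List (String × String))) :=
  let sub := PySem.Str.slice string (some beginning) (some e)
  if (!(voc.any (fun kv => kv.1 == sub))) || (sub == string) then ed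
  else ed ++ [(beginning, e, [("label", sub)])]

lemma a_unfold (string : String) (voc : List (String × Int)) :
    build_graph_data string voc
      = (PySem.List.pyRange 0 (PySem.Str.len string) 1).foldl (fun edge_data beginning =>
          (PySem.List.pyRange (beginning + 1) (PySem.Str.len string + 1) 1).foldl
            (aInner string voc beginning) edge_data) [] := rfl

lemma b_unfold (string : String) (voc : List (String × Int)) :
    build_graph_data_alt string voc
      = (PySem.List.pyRange 0 (PySem.Str.len string) 1).foldl (fun edges b =>
          bgdInner string.toList voc (bgdPrefixes voc) b
            (PySem.List.pyRange (b + 1) (PySem.Str.len string + 1) 1) [] edges) [] := rfl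

lemma foldl_set_add_mono {α β : Type} [BEq α] [LawfulBEq α] (l : List β) (f : β → α)
    (s : PySem.Set α) (x : α) (hx : x ∈ s) :
    x ∈ l.foldl (fun s y => PySem.Set.add s (f y)) s := by
  induction l generalizing s with
  | nil => exact hx
  | cons y ys ih => exact ih _ ((PySem.Set.mem_add _ _ _).2 (Or.inl hx))

lemma mem_foldl_add_of_hit {α β : Type} [BEq α] [LawfulBEq α] (l : List β) (f : β → α)
    (s : PySem.Set α) (x : α) (h : ∃ y ∈ l, f y = x) :
    x ∈ l.foldl (fun s y => PySem.Set.add s (f y)) s := by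
  induction l generalizing s with
  | nil => simp at h
  | cons y ys ih =>
    rcases h with ⟨z, hz, hfz⟩
    rcases List.mem_cons.1 hz with rfl | hz'
    · exact foldl_set_add_mono ys f _ x ((PySem.Set.mem_add _ _ _).2 (Or.inr hfz.symm))
    · exact ih _ ⟨z, hz', hfz⟩

lemma foldl_prefixes_mono (l : List (String × Int)) (s : PySem.Set (List Char)) (x : List Char) (hx : x ∈ s) :
    x ∈ l.foldl (fun pfs w =>
      (PySem.List.pyRange 1 (PySem.Str.len w.1 + 1) 1).foldl (fun pfs2 i =>
        PySem.Set.add pfs2 (PySem.Chars.slice w.1.toList none (some i))) pfs) s := by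
  induction l generalizing s with
  | nil => exact hx
  | cons w ws ih => exact ih _ (foldl_set_add_mono _ _ _ _ hx)

lemma take_mem_bgdPrefixes (voc : List (String × Int)) (w : String × Int) (hw : w ∈ voc)
    (i : Nat) (h1 : 1 ≤ i) (h2 : i ≤ w.1.toList.length) :
    w.1.toList.take i ∈ bgdPrefixes voc := by
  unfold bgdPrefixes
  generalize PySem.Set.empty = s
  induction voc generalizing s with
  | nil => simp at hw
  | cons v vs ih =>
    rcases List.mem_cons.1 hw with rfl | hw'
    · simp only [List.foldl_cons]
      apply foldl_prefixes_mono
      apply mem_foldl_add_of_hit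
      refine ⟨(i : Int), ?_, ?_⟩
      · rw [PySem.List.mem_pyRange_one]
        constructor
        · exact_mod_cast h1
        · simp only [PySem.Str.len]
          omega
      · rw [PySem.Chars.slice_eq_listSlice, PySem.List.slice_to _ (by positivity)]
        simp
    · exact ih hw' _

lemma no_key_of_not_prefix (voc : List (String × Int)) (cs : List Char) (b e e' : Nat)
    (hb : b + 1 ≤ e) (hee' : e ≤ e') (he' : e' ≤ cs.length)
    (hnp : (cs.drop b).take (e - b) ∉ bgdPrefixes voc)
    (kv : String × Int) (hkv : kv ∈ voc) : kv.1.toList ≠ (cs.drop b).take (e' - b) := by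
  intro h
  apply hnp
  have hlen : kv.1.toList.length = e' - b := by
    rw [h]; simp [List.length_take, List.length_drop]; omega
  have := take_mem_bgdPrefixes voc kv hkv (e - b) (by omega) (by omega)
  rwa [h, List.take_take, min_eq_left (by omega)] at this

lemma foldl_fixed {α β : Type} (l : List α) (f : β → α → β) (acc : β)
    (h : ∀ acc x, x ∈ l → f acc x = acc) : l.foldl f acc = acc := by
  induction l generalizing acc with
  | nil => rfl
  | cons x xs ih =>
    rw [List.foldl_cons, h acc x (List.mem_cons_self), ih]
    intro a y hy; exact h a y (List.mem_cons_of_mem _ hy)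

lemma inner_eq (string : String) (voc : List (String × Int)) (b : Nat) :
    ∀ (m e : Nat), string.toList.length + 1 ≤ e + m → b + 1 ≤ e →
    ∀ acc, bgdInner string.toList voc (bgdPrefixes voc) (b : Int)
        (PySem.List.pyRange ((e : Nat) : Int) (PySem.Str.len string + 1) 1)
        ((string.toList.drop b).take (e - 1 - b)) acc
      = (PySem.List.pyRange ((e : Nat) : Int) (PySem.Str.len string + 1) 1).foldl (aInner string voc (b : Int)) acc := by
  intro m
  induction m with
  | zero =>
    intro e he hb acc
    rw [PySem.List.pyRange_one_eq_nil (by simp only [PySem.Str.len]; omega)]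
    rfl
  | succ m ih =>
    intro e he hb acc
    by_cases hend : string.toList.length + 1 ≤ e
    · rw [PySem.List.pyRange_one_eq_nil (by simp only [PySem.Str.len]; omega)]
      rfl
    · have hgetlt : e - 1 < string.toList.length := by omega
      have hidx : ((e : Nat) : Int) - 1 = ((e - 1 : Nat) : Int) := by omega
      have hget : PySem.List.pyGet? string.toList (((e : Nat) : Int) - 1) = some (string.toList[e-1]) := by
        rw [hidx, PySem.List.pyGet?_natCast, List.getElem?_eq_getElem hgetlt]
      have hlab : (string.toList.drop b).take (e - 1 - b) ++ [string.toList[e-1]] = (string.toList.drop b).take (e - b) := by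
        have h1 : (string.toList.drop b)[e-1-b]? = some (string.toList[e-1]) := by
          rw [List.getElem?_drop]
          have hbb : b + (e - 1 - b) = e - 1 := by omega
          rw [hbb, List.getElem?_eq_getElem hgetlt]
        have h3 := @List.take_add_one _ (string.toList.drop b) (e-1-b)
        rw [h1] at h3
        have h2 : e - 1 - b + 1 = e - b := by omega
        rw [h2] at h3
        simpa using h3.symm
      rw [PySem.List.pyRange_one_cons (by simp only [PySem.Str.len]; omega)]
      by_cases hc : PySem.Set.contains (bgdPrefixes voc) ((string.toList.drop b).take (e - b)) = true
      · -- prefix present: both sides take one real step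
        have hsub : PySem.Str.slice string (some (b : Int)) (some ((e : Nat) : Int)) = String.ofList ((string.toList.drop b).take (e - b)) := by
          unfold PySem.Str.slice
          rw [PySem.Chars.slice_eq_listSlice, PySem.List.slice_natCast]
        have hany : (voc.any (fun kv => kv.1 == PySem.Str.slice string (some (b : Int)) (some ((e : Nat) : Int)))) = (voc.any (fun kv => kv.1.toList == (string.toList.drop b).take (e - b))) := by
          rw [hsub, Bool.eq_iff_iff]
          simp [List.any_eq_true, beq_iff_eq, ← String.toList_inj]
        have heqs : (PySem.Str.slice string (some (b : Int)) (some ((e : Nat) : Int)) == string) = (((string.toList.drop b).take (e - b)) == string.toList) := by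
          rw [hsub, Bool.eq_iff_iff]
          simp [beq_iff_eq, ← String.toList_inj]
        have hstep : aInner string voc (b : Int) acc ((e : Nat) : Int)
            = (if (voc.any (fun kv => kv.1.toList == (string.toList.drop b).take (e - b))) && !(((string.toList.drop b).take (e - b)) == string.toList) then
                acc ++ [((b : Int), ((e : Nat) : Int), [("label", String.ofList ((string.toList.drop b).take (e - b)))])]
              else acc) := by
          simp only [aInner]
          rw [hany, heqs, hsub]
          cases h1 : (voc.any (fun kv => kv.1.toList == (string.toList.drop b).take (e - b))) <;>
            cases h2 : (((string.toList.drop b).take (e - b)) == string.toList) <;>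
              simp
        have hcast : ((e + 1 : Nat) : Int) = ((e : Nat) : Int) + 1 := by push_cast; ring
        have ihe := ih (e + 1) (by omega) (by omega)
          (aInner string voc (b : Int) acc ((e : Nat) : Int))
        rw [hcast] at ihe
        have hlab' : (e + 1) - 1 - b = e - b := by omega
        rw [hlab'] at ihe
        rw [hstep] at ihe
        simp only [bgdInner, hget, Option.elim_some, hlab, hc, Bool.not_true, Bool.false_eq_true,
          if_false, List.foldl_cons, hstep]
        exact ihe
      · -- prefix absent: B breaks, and no later substring can be a key
        have hcf : PySem.Set.contains (bgdPrefixes voc) ((string.toList.drop b).take (e - b)) = false := by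
          revert hc; cases PySem.Set.contains (bgdPrefixes voc) ((string.toList.drop b).take (e - b)) <;> simp
        have hnp : (string.toList.drop b).take (e - b) ∉ bgdPrefixes voc := fun hmem => hc ((PySem.Set.contains_iff _ _).2 hmem)
        have hlhs : bgdInner string.toList voc (bgdPrefixes voc) (b : Int)
            (((e : Nat) : Int) :: PySem.List.pyRange (((e : Nat) : Int) + 1) (PySem.Str.len string + 1))
            ((string.toList.drop b).take (e - 1 - b)) acc = acc := by
          simp only [bgdInner, hget, Option.elim_some, hlab, hcf, Bool.not_false, if_true]
        rw [hlhs]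
        refine (foldl_fixed _ _ _ ?_).symm
        intro acc2 x hx
        have hx' : ((e : Nat) : Int) <= x ∧ x < (string.toList.length : Int) + 1 := by
          rcases List.mem_cons.1 hx with rfl | hx2
          · constructor
            · omega
            · exact_mod_cast (show ((e : Nat) : Int) < (string.toList.length : Int) + 1 by omega)
          · rw [PySem.List.mem_pyRange_one] at hx2
            constructor
            · omega
            · have := hx2.2
              simp only [PySem.Str.len] at this
              omega
        have hxe : x = ((x.toNat : Nat) : Int) := by omega
        have hsub' : PySem.Str.slice string (some (b : Int)) (some x) = String.ofList ((string.toList.drop b).take (x.toNat - b)) := by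
          rw [hxe]
          unfold PySem.Str.slice
          rw [PySem.Chars.slice_eq_listSlice, PySem.List.slice_natCast, Int.toNat_natCast]
        have hanyf : (voc.any (fun kv => kv.1 == PySem.Str.slice string (some (b : Int)) (some x))) = false := by
          rw [hsub', List.any_eq_false]
          intro kv hkv
          simp only [beq_iff_eq, ← String.toList_inj, String.toList_ofList]
          exact no_key_of_not_prefix voc string.toList b e x.toNat hb (by omega) (by omega) hnp kv hkv
        simp [aInner, hanyf]

-- ===== VERDICT (by name: the statement is the Claim_ definition above) =====
theorem build_graph_data_spec : Claim_equal_build_graph_data := by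
  intro string voc _
  unfold Spec_build_graph_data
  rw [a_unfold, b_unfold]
  refine (PySem.List.foldl_congr_mem _ _ _ _ ?_).symm
  intro acc bi hbi
  rw [PySem.List.mem_pyRange_one] at hbi
  obtain ⟨hbi0, hbiN⟩ := hbi
  have hN : PySem.Str.len string = (string.toList.length : Int) := by simp [PySem.Str.len]
  set N := string.toList.length with hNdef
  have hb' : bi = ((bi.toNat : Nat) : Int) := (Int.toNat_of_nonneg hbi0).symm
  have := inner_eq string voc bi.toNat N (bi.toNat + 1) (by omega) (by omega) acc
  rw [hb']
  have hcast : ((bi.toNat + 1 : Nat) : Int) = (bi.toNat : Int) + 1 := by push_cast; ring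
  rw [← hcast]
  simpa using this
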